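-- pv_equiv track=rewrite | github.com/ankitanwar/DataStructure | arrays/elementsMoreThanX.py | moreThanN
-- ===== SOURCE A (Python) =====
-- import collections
--
-- def moreThanN(arr,n,k):
--     x=collections.Counter(arr)
--     count=0
--     t=int(n/k)
--     for keys in x:
--         if x[keys]>t:
--             count+=1
--     return count
-- ===== SOURCE B (Python) =====
-- def moreThanN(arr, n, k):
--     # Sort a copy, then scan runs of equal elements: each run is one distinct
--     # value whose length is its multiplicity; count runs longer than t.
--     t = int(n / k)
--     s = sorted(arr)
--     count = 0
--     i = 0
--     while i < len(s):
--         j = i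
--         while j < len(s) and s[j] == s[i]:
--             j += 1
--         if j - i > t:
--             count += 1
--         i = j
--     return count
-- ===== Notes on version B (the rewrite author's own statement) =====
-- stated objective: alternative
-- what changed: B replaces the Counter hash-map pass plus key scan by sort-then-run-scan: it sorts a copy and counts maximal runs of equal elements longer than t.
import Mathlib
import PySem

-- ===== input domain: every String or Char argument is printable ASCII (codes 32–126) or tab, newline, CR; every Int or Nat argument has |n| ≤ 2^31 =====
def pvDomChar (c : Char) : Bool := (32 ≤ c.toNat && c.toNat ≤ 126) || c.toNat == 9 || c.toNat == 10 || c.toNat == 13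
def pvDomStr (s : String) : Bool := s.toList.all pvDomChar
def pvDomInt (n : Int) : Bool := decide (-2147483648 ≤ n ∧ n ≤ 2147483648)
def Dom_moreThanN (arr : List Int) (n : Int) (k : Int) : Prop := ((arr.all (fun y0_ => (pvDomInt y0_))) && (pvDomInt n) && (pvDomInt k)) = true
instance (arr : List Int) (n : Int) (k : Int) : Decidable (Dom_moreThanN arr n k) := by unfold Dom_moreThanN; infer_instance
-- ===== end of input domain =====

-- B replaces A's Counter-then-key-scan by sort-then-run-scan (an alternative algorithm, not claimed faster).

-- ===== PORT A =====
-- x = collections.Counter(arr); t = int(n/k); count the keys with x[key] > t.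
-- int(n/k) is ported as Int.tdiv (truncation toward zero); this is exact for |n|,|k| ≤ 2^31 (Dom), k ≠ 0.
def moreThanN (arr : List Int) (n : Int) (k : Int) : Int :=
  let x := PySem.Dict.counter arr
  let t := n.tdiv k
  x.keys.foldl (fun count key => if x.getD key 0 > t then count + 1 else count) 0

-- ===== PORT B =====
-- the outer while loop of Source B: the list starting at i is a :: rest; the inner while
-- advances j over the elements equal to s[i] (= takeWhile), leaving i = j at dropWhile.
def bRuns (t : Int) : List Int → Int
  | [] => 0
  | a :: rest =>
      (if ((rest.takeWhile (fun y => y == a)).length : Int) + 1 > t then 1 else 0)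
        + bRuns t (rest.dropWhile (fun y => y == a))
termination_by l => l.length
decreasing_by
  simpa using Nat.lt_succ_of_le (List.Sublist.length_le (List.dropWhile_sublist _))

def moreThanN_alt (arr : List Int) (n : Int) (k : Int) : Int :=
  let t := n.tdiv k
  bRuns t (PySem.List.sorted arr (fun x => x) false)

-- ===== PRECONDITION & SPEC =====
-- Pre_ excludes only k = 0, where A (and B) raise ZeroDivisionError.
def Pre_moreThanN (arr : List Int) (n : Int) (k : Int) : Prop := k ≠ 0
instance (arr : List Int) (n : Int) (k : Int) : Decidable (Pre_moreThanN arr n k) := by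
  unfold Pre_moreThanN; infer_instance

def pvWitness_moreThanN : List Int × Int × Int := ([1, 1, 2], 3, 2)

def Spec_moreThanN (arr : List Int) (n : Int) (k : Int) (out : Int) : Prop := out = moreThanN_alt arr n k
instance (arr : List Int) (n : Int) (k : Int) (out : Int) : Decidable (Spec_moreThanN arr n k out) := by unfold Spec_moreThanN; infer_instance

-- ===== CLAIM (what is proved, stated in full; the proofs are below) =====
def Claim_equal_moreThanN : Prop := ∀ (arr : List Int) (n : Int) (k : Int), Dom_moreThanN arr n k → Pre_moreThanN arr n k → Spec_moreThanN arr n k (moreThanN arr n k)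

-- ===== LEMMAS AND PROOFS =====

-- the common value: number of distinct elements of arr with multiplicity > t
def distinctCount (arr : List Int) (t : Int) : Int :=
  ((arr.toFinset.filter (fun v => (arr.count v : Int) > t)).card : Int)

theorem countP_nodup_card (l : List Int) (hl : l.Nodup) (p : Int → Bool) :
    (l.countP p : Int) = (({x ∈ l.toFinset | p x = true}).card : Int) := by
  rw [← List.toFinset_filter, List.toFinset_card_of_nodup (hl.filter p), List.countP_eq_length_filter]

theorem A_side (arr : List Int) (t : Int) :
    (PySem.Dict.counter arr).keys.foldl
      (fun count key => if (PySem.Dict.counter arr).getD key 0 > t then count + 1 else count) 0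
      = distinctCount arr t := by
  rw [PySem.Dict.keys_counter]
  have h := PySem.List.foldl_if_add_one (fun key => decide ((PySem.Dict.counter arr).getD key 0 > t)) (PySem.Set.ofList arr) 0
  simp only [decide_eq_true_eq] at h
  rw [h]
  simp only [zero_add]
  rw [countP_nodup_card _ (PySem.Set.nodup_ofList arr)]
  unfold distinctCount
  congr 1
  have hfs : (PySem.Set.ofList arr : List Int).toFinset = arr.toFinset := by
    ext x; simp [List.mem_toFinset, PySem.Set.mem_ofList]
  rw [hfs]
  simp [PySem.Dict.getD_counter]

theorem bRuns_eq_distinctCount (t : Int) (l : List Int) (hs : l.Pairwise (· ≤ ·)) :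
    bRuns t l = distinctCount l t := by
  induction l using bRuns.induct with
  | case1 => simp [bRuns, distinctCount]
  | case2 a rest ih =>
    rw [bRuns]
    set tw := rest.takeWhile (fun y => y == a) with htw
    set dw := rest.dropWhile (fun y => y == a) with hdw
    have hsplit : tw ++ dw = rest := List.takeWhile_append_dropWhile
    have hrest : rest.Pairwise (· ≤ ·) := (List.pairwise_cons.mp hs).2
    have hle : ∀ x ∈ rest, a ≤ x := (List.pairwise_cons.mp hs).1
    have hdws : dw.Sublist rest := List.dropWhile_sublist _
    have hdwp : dw.Pairwise (· ≤ ·) := hrest.sublist hdws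
    have htwa : ∀ x ∈ tw, x = a := fun x hx => by
      simpa using List.mem_takeWhile_imp hx
    have hadw : a ∉ dw := by
      cases hdweq : dw with
      | nil => simp
      | cons h tl =>
        have hne : List.dropWhile (fun y => y == a) rest ≠ [] := by
          rw [← hdw, hdweq]; simp
        have hh := List.head_dropWhile_not (fun y => y == a) (l := rest) hne
        have hhd : (List.dropWhile (fun y => y == a) rest).head hne = h := by
          have : List.dropWhile (fun y => y == a) rest = h :: tl := by rw [← hdw, hdweq]
          simp [this]
        rw [hhd] at hh
        have hha : h ≠ a := by simpa using hh
        have hhmem : h ∈ rest := hdws.mem (hdweq ▸ List.mem_cons_self)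
        have halt : a < h := lt_of_le_of_ne (hle _ hhmem) (Ne.symm hha)
        have htl : ∀ x ∈ tl, h ≤ x := (List.pairwise_cons.mp (hdweq ▸ hdwp)).1
        intro hmem
        rcases List.mem_cons.mp hmem with h1 | h1
        · exact hha h1.symm
        · exact absurd (lt_of_lt_of_le halt (htl _ h1)) (lt_irrefl a)
    have hca : (a :: rest).count a = tw.length + 1 := by
      rw [List.count_cons_self, ← hsplit, List.count_append,
        List.count_eq_length.mpr (fun b hb => (htwa b hb).symm),
        List.count_eq_zero.mpr hadw]
    have htwv : ∀ v, v ≠ a → (a :: rest).count v = dw.count v := by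
      intro v hv
      rw [List.count_cons, ← hsplit, List.count_append,
        List.count_eq_zero.mpr (fun hmem => hv (htwa v hmem))]
      simp [Ne.symm hv]
    have hadf : a ∉ dw.toFinset := by simpa using hadw
    have hfin : (a :: rest).toFinset = insert a dw.toFinset := by
      ext x
      simp only [List.mem_toFinset, Finset.mem_insert, List.mem_cons, ← hsplit, List.mem_append]
      constructor
      · rintro (h | h | h)
        · exact Or.inl h
        · exact Or.inl (htwa x h)
        · exact Or.inr h
      · rintro (h | h)
        · exact Or.inl h
        · exact Or.inr (Or.inr h)
    have hfc : Finset.filter (fun v => ((a :: rest).count v : Int) > t) dw.toFinset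
             = Finset.filter (fun v => ((dw.count v : Int) > t)) dw.toFinset := by
      apply Finset.filter_congr
      intro v hv
      have hvne : v ≠ a := fun h => hadf (h ▸ hv)
      rw [htwv v hvne]
    have hsub : a ∉ Finset.filter (fun v => ((dw.count v : Int) > t)) dw.toFinset :=
      fun h => hadf (Finset.mem_of_mem_filter a h)
    rw [ih hdwp]
    unfold distinctCount
    rw [hfin, Finset.filter_insert, hfc, hca]
    push_cast
    split_ifs with hcond
    · rw [Finset.card_insert_of_notMem hsub]
      push_cast
      ring
    · ring

theorem distinctCount_perm (l₁ l₂ : List Int) (t : Int) (h : l₁.Perm l₂) :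
    distinctCount l₁ t = distinctCount l₂ t := by
  unfold distinctCount
  have h1 : l₁.toFinset = l₂.toFinset := by
    ext x; simp [List.mem_toFinset, h.mem_iff]
  have h2 : {v ∈ l₂.toFinset | ((l₁.count v : Int) > t)} = {v ∈ l₂.toFinset | ((l₂.count v : Int) > t)} :=
    Finset.filter_congr (fun v _ => by rw [h.count_eq])
  rw [h1, h2]

theorem moreThanN_eq (arr : List Int) (n k : Int) :
    moreThanN arr n k = distinctCount arr (n.tdiv k) :=
  A_side arr (n.tdiv k)

theorem moreThanN_alt_eq (arr : List Int) (n k : Int) :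
    moreThanN_alt arr n k = distinctCount arr (n.tdiv k) := by
  show bRuns (n.tdiv k) (PySem.List.sorted arr (fun x => x) false) = _
  rw [bRuns_eq_distinctCount _ _ (by simpa using PySem.List.sorted_pairwise arr (fun x => x))]
  exact distinctCount_perm _ _ _ (PySem.List.sorted_perm arr (fun x => x) false)

-- ===== VERDICT (by name: the statement is the Claim_ definition above) =====
theorem moreThanN_spec : Claim_equal_moreThanN := by
  intro arr n k _ _
  unfold Spec_moreThanN
  rw [moreThanN_eq, moreThanN_alt_eq]
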